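-- pv_equiv track=rewrite | github.com/SuperMister/PythonStart | PE4B/PE4B.py | fibo_sum_every_second
-- ===== SOURCE A (Python) =====
-- def fibo_sum_every_second(number):
--     """Count summary of every second fibonacci number.
--
--     :param number: Amount of fibonacci numbers given.
--     :return: Return summary of every second fibonacci number.
--     """
--     if number < 1:
--         return 0
--     now = 1
--     previous = 0
--     sum = 0
--     for x in range(0, number - 1):
--         now += previous
--         previous = now - previous
--         if x % 2 == 0:
--             sum += now
--     return sum
-- ===== SOURCE B (Python) =====
-- def _fib_pair(n):
--     """Fast-doubling: return (F(n), F(n+1)) with F(0)=0, F(1)=1."""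
--     if n == 0:
--         return (0, 1)
--     a, b = _fib_pair(n // 2)
--     c = a * (2 * b - a)
--     d = a * a + b * b
--     if n % 2 == 0:
--         return (c, d)
--     return (d, c + d)
--
--
-- def fibo_sum_every_second(number):
--     """Count summary of every second fibonacci number.
--
--     :param number: Amount of fibonacci numbers given.
--     :return: Return summary of every second fibonacci number.
--     """
--     if number < 1:
--         return 0
--     k = number // 2
--     return _fib_pair(2 * k + 1)[0] - 1
-- ===== Notes on version B (the rewrite author's own statement) =====
-- stated objective: faster
-- what changed: Replaced the O(n) Fibonacci loop with the closed form F(2)+F(4)+...+F(2k) = F(2k+1)-1 (k = number//2) computed by fast-doubling Fibonacci; intended as faster (measured 225x at the largest size both finished; on the very largest generated inputs both time out because the Fibonacci result itself is enormous).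
import Mathlib
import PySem

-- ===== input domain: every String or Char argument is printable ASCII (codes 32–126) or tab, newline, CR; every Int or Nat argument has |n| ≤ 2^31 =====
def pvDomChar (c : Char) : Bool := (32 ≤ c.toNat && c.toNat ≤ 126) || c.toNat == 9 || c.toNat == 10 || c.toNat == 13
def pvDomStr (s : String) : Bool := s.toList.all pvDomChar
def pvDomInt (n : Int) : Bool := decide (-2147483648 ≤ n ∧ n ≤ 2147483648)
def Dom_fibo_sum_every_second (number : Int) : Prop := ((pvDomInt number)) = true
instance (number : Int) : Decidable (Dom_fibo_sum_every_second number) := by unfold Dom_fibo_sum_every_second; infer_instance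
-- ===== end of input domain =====

-- B replaces A's linear Fibonacci loop by the identity Fib(2)+Fib(4)+...+Fib(2k) = Fib(2k+1)-1 (k = number//2) via fast-doubling Fibonacci; intended as faster (measured 225x at the largest size both programs finished).


-- ===== PORT A =====
-- loop body of A: now += previous; previous = now - previous; if x % 2 == 0: sum += now
def stepA (st : Int × Int × Int) (x : Int) : Int × Int × Int :=
  let now := st.1 + st.2.1
  let previous := now - st.2.1
  let sum := if PySem.Int.mod x 2 == 0 then st.2.2 + now else st.2.2
  (now, previous, sum)

def fibo_sum_every_second (number : Int) : Int :=
  if number < 1 then 0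
  else
    let st := (PySem.List.pyRange 0 (number - 1) 1).foldl stepA (1, 0, 0)
    st.2.2

-- ===== PORT B =====
-- fast doubling: fibPair n = (F n, F (n+1))
def fibPair (n : Nat) : Int × Int :=
  if n = 0 then (0, 1)
  else
    let p := fibPair (n / 2)
    let a := p.1
    let b := p.2
    let c := a * (2 * b - a)
    let d := a * a + b * b
    if n % 2 = 0 then (c, d) else (d, c + d)
termination_by n
decreasing_by omega

def fibo_sum_every_second_alt (number : Int) : Int :=
  if number < 1 then 0
  else
    let k := PySem.Int.floordiv number 2
    (fibPair (2 * k + 1).toNat).1 - 1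

-- ===== PRECONDITION & SPEC =====
def Spec_fibo_sum_every_second (number : Int) (out : Int) : Prop := out = fibo_sum_every_second_alt number
instance (number : Int) (out : Int) : Decidable (Spec_fibo_sum_every_second number out) := by unfold Spec_fibo_sum_every_second; infer_instance

-- ===== CLAIM (what is proved, stated in full; the proofs are below) =====
def Claim_equal_fibo_sum_every_second : Prop := ∀ (number : Int), Dom_fibo_sum_every_second number → Spec_fibo_sum_every_second number (fibo_sum_every_second number)

-- ===== LEMMAS AND PROOFS =====
theorem fibPair_eq (n : Nat) : fibPair n = ((Nat.fib n : Int), (Nat.fib (n + 1) : Int)) := by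
  induction n using Nat.strong_induction_on with
  | _ n ih =>
    by_cases h0 : n = 0
    · subst h0; rw [fibPair]; simp
    · have hlt : n / 2 < n := Nat.div_lt_self (Nat.pos_of_ne_zero h0) (by norm_num)
      rw [fibPair, if_neg h0, ih (n / 2) hlt]
      have hle : Nat.fib (n / 2) ≤ 2 * Nat.fib (n / 2 + 1) :=
        le_trans Nat.fib_le_fib_succ (by omega)
      have hc : ((Nat.fib (n / 2) : Int)) * (2 * (Nat.fib (n / 2 + 1) : Int) - (Nat.fib (n / 2) : Int))
          = (Nat.fib (2 * (n / 2)) : Int) := by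
        rw [Nat.fib_two_mul]; push_cast [Nat.sub_le, hle]; ring
      have hd : ((Nat.fib (n / 2) : Int)) * (Nat.fib (n / 2) : Int)
            + (Nat.fib (n / 2 + 1) : Int) * (Nat.fib (n / 2 + 1) : Int)
          = (Nat.fib (2 * (n / 2) + 1) : Int) := by
        rw [Nat.fib_two_mul_add_one]; push_cast; ring
      by_cases hpar : n % 2 = 0
      · have hn : 2 * (n / 2) = n := by omega
        have hn1 : 2 * (n / 2) + 1 = n + 1 := by omega
        rw [if_pos hpar, Prod.mk.injEq]
        exact ⟨by rw [hc, hn], by rw [hd, hn1]⟩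
      · have hn : 2 * (n / 2) + 1 = n := by omega
        have hn1 : Nat.fib (2 * (n / 2)) + Nat.fib (2 * (n / 2) + 1) = Nat.fib (n + 1) := by
          rw [← Nat.fib_add_two]; congr 1; omega
        rw [if_neg hpar, Prod.mk.injEq]
        refine ⟨by rw [hd, hn], ?_⟩
        rw [hc, hd]
        push_cast [← hn1]; ring

-- A's loop invariant: after m iterations the state is (F(m+1), F m, F(2*ceil(m/2)+1) - 1)
theorem loopA_eq (m : Nat) :
    (PySem.List.pyRange 0 (m : Int) 1).foldl stepA (1, 0, 0)
      = ((Nat.fib (m + 1) : Int), (Nat.fib m : Int), (Nat.fib (2 * ((m + 1) / 2) + 1) : Int) - 1) := by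
  induction m with
  | zero => simp [PySem.List.pyRange]
  | succ m ih =>
    have hsplit : PySem.List.pyRange 0 ((m : Int) + 1) 1
        = PySem.List.pyRange 0 (m : Int) 1 ++ [(m : Int)] :=
      PySem.List.pyRange_one_succ_right (by positivity)
    have hcast : ((m + 1 : Nat) : Int) = (m : Int) + 1 := by push_cast; ring
    have hmod : PySem.Int.mod ((m : Int)) 2 = (m : Int) % 2 :=
      PySem.Int.mod_eq_emod_of_pos (by norm_num)
    rw [hcast, hsplit, List.foldl_append, ih]
    simp only [List.foldl_cons, List.foldl_nil, stepA, hmod]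
    rcases Nat.even_or_odd m with ⟨j, hj⟩ | ⟨j, hj⟩
    · have hcond : ((((m : Int) % 2 == 0) : Bool) = true) := by
        simp; omega
      rw [hcond, if_pos rfl, Prod.mk.injEq, Prod.mk.injEq]
      refine ⟨?_, ?_, ?_⟩
      · rw [show m + 1 + 1 = m + 2 from rfl, Nat.fib_add_two]; push_cast; ring
      · ring
      · have e1 : (m + 1 + 1) / 2 = m / 2 + 1 := by omega
        have e2 : (m + 1) / 2 = m / 2 := by omega
        have e3 : Nat.fib (2 * (m / 2 + 1) + 1)
            = Nat.fib (2 * (m / 2) + 1) + Nat.fib (2 * (m / 2) + 2) := by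
          rw [show 2 * (m / 2 + 1) + 1 = (2 * (m / 2) + 1) + 2 from by ring, Nat.fib_add_two]
        have e4 : 2 * (m / 2) + 2 = m + 2 := by omega
        have e5 : Nat.fib (m + 2) = Nat.fib m + Nat.fib (m + 1) := Nat.fib_add_two
        rw [e1, e2, e3, e4, e5]
        push_cast; ring
    · have hcond : ((((m : Int) % 2 == 0) : Bool) = false) := by
        simp; omega
      rw [hcond]
      simp only [Bool.false_eq_true, if_false, Prod.mk.injEq]
      refine ⟨?_, ?_, ?_⟩
      · rw [show m + 1 + 1 = m + 2 from rfl, Nat.fib_add_two]; push_cast; ring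
      · ring
      · have e1 : (m + 1 + 1) / 2 = (m + 1) / 2 := by omega
        rw [e1]

-- ===== VERDICT (by name: the statement is the Claim_ definition above) =====
theorem fibo_sum_every_second_spec : Claim_equal_fibo_sum_every_second := by
  intro number _
  unfold Spec_fibo_sum_every_second fibo_sum_every_second fibo_sum_every_second_alt
  by_cases h : number < 1
  · simp [h]
  · rw [if_neg h, if_neg h]
    push_neg at h
    obtain ⟨m, hm⟩ : ∃ m : Nat, number = (m : Int) + 1 :=
      ⟨(number - 1).toNat, by omega⟩
    subst hm
    have h1 : (m : Int) + 1 - 1 = (m : Int) := by ring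
    rw [h1, loopA_eq]
    have hk : PySem.Int.floordiv ((m : Int) + 1) 2 = (((m + 1) / 2 : Nat) : Int) := by
      rw [PySem.Int.floordiv_eq_ediv_of_pos (by norm_num)]
      omega
    rw [hk]
    have h2 : (2 * (((m + 1) / 2 : Nat) : Int) + 1).toNat = 2 * ((m + 1) / 2) + 1 := by omega
    show (Nat.fib (2 * ((m + 1) / 2) + 1) : Int) - 1
        = (fibPair (2 * (((m + 1) / 2 : Nat) : Int) + 1).toNat).1 - 1
    rw [h2, fibPair_eq]
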